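-- pv_equiv track=rewrite | github.com/BAMresearch/SyFoS | syfos/export_data.py | create_column_names
-- ===== SOURCE A (Python) =====
-- from typing import List, NamedTuple, Dict, Callable
--
-- def create_column_names(
-- 	numberOfCurves: int
-- ) -> List[str]:
-- 	"""
--
-- 	Parameters:
-- 		numberOfCurves(int): .
--
-- 	Returns:
-- 		columnNames(list): .
-- 	"""
-- 	columnNames = []
--
-- 	for index in range(numberOfCurves):
-- 		if index == 0:
-- 			columnNames.append("ideal_curve_x_values")
-- 			columnNames.append("ideal_curve_y_values")
-- 		elif index == 1:
-- 			columnNames.append("ideal_curve_shifted_x_values")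
-- 			columnNames.append("ideal_curve_shifted_y_values")
-- 		else:
-- 			columnNames.append("curve_" + str(index - 1) + "_x_values")
-- 			columnNames.append("curve_" + str(index - 1) + "_y_values")
--
-- 	return columnNames
-- ===== SOURCE B (Python) =====
-- def create_column_names(
-- 	numberOfCurves: int
-- ):
-- 	bases = ["ideal_curve", "ideal_curve_shifted"][:max(numberOfCurves, 0)]
-- 	bases += ["curve_" + str(i) for i in range(1, numberOfCurves - 1)]
-- 	return [base + suffix for base in bases for suffix in ("_x_values", "_y_values")]
-- ===== Notes on version B (the rewrite author's own statement) =====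
-- stated objective: alternative
-- what changed: Replaces A's per-index branching loop over full column names with a data-driven construction: a sliced table of special base names plus generated generic base names, then a cartesian product of the base list with the two suffixes.
import Mathlib
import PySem

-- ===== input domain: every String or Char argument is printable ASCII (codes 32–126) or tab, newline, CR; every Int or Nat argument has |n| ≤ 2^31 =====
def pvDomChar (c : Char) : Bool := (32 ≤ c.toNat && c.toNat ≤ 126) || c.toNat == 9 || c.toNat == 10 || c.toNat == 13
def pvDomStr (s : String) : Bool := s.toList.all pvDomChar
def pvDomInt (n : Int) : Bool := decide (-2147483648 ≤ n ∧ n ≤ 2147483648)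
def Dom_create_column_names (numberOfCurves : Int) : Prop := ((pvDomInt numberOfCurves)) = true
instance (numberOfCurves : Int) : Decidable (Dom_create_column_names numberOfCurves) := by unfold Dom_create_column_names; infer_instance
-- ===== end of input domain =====

-- B builds a sliced table of base names plus generated generic bases and takes its product with the two suffixes, instead of A's per-index branching loop (objective: alternative).

-- ===== PORT A =====
def create_column_names (numberOfCurves : Int) : List String :=
  (PySem.List.pyRange 0 numberOfCurves 1).foldl
    (fun columnNames index =>
      if index == 0 then
        columnNames ++ ["ideal_curve_x_values"] ++ ["ideal_curve_y_values"]
      else if index == 1 then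
        columnNames ++ ["ideal_curve_shifted_x_values"] ++ ["ideal_curve_shifted_y_values"]
      else
        columnNames ++ ["curve_" ++ PySem.Int.toStr (index - 1) ++ "_x_values"]
          ++ ["curve_" ++ PySem.Int.toStr (index - 1) ++ "_y_values"]) []

-- ===== PORT B =====
def create_column_names_alt (numberOfCurves : Int) : List String :=
  let bases :=
    PySem.List.slice ["ideal_curve", "ideal_curve_shifted"] none (some (max numberOfCurves 0))
    ++ (PySem.List.pyRange 1 (numberOfCurves - 1) 1).map (fun i => "curve_" ++ PySem.Int.toStr i)
  bases.flatMap (fun base => ["_x_values", "_y_values"].map (fun suffix => base ++ suffix))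

-- ===== PRECONDITION & SPEC =====
def Spec_create_column_names (numberOfCurves : Int) (out : List String) : Prop := out = create_column_names_alt numberOfCurves
instance (numberOfCurves : Int) (out : List String) : Decidable (Spec_create_column_names numberOfCurves out) := by unfold Spec_create_column_names; infer_instance

-- ===== CLAIM =====
def Claim_equal_create_column_names : Prop := ∀ (numberOfCurves : Int), Dom_create_column_names numberOfCurves → Spec_create_column_names numberOfCurves (create_column_names numberOfCurves)

-- ===== LEMMAS AND PROOFS =====

-- A's loop over indices ≥ 2 always takes the else branch; shifted by one it is B's generic tail.
theorem pv_tail (k : Nat) : ∀ (a b : Int), (b - a).toNat = k → 2 ≤ a → ∀ (acc : List String),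
    (PySem.List.pyRange a b 1).foldl
      (fun columnNames index =>
        if index == 0 then columnNames ++ ["ideal_curve_x_values"] ++ ["ideal_curve_y_values"]
        else if index == 1 then columnNames ++ ["ideal_curve_shifted_x_values"] ++ ["ideal_curve_shifted_y_values"]
        else columnNames ++ ["curve_" ++ PySem.Int.toStr (index - 1) ++ "_x_values"]
          ++ ["curve_" ++ PySem.Int.toStr (index - 1) ++ "_y_values"]) acc
    = acc ++ (PySem.List.pyRange (a - 1) (b - 1) 1).flatMap
        (fun i => ["_x_values", "_y_values"].map
          (fun suffix => ("curve_" ++ PySem.Int.toStr i) ++ suffix)) := by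
  induction k with
  | zero =>
    intro a b hk ha acc
    rw [PySem.List.pyRange_one_eq_nil (by omega), PySem.List.pyRange_one_eq_nil (by omega)]
    simp
  | succ m ih =>
    intro a b hk ha acc
    rw [PySem.List.pyRange_one_cons (by omega : a < b),
        PySem.List.pyRange_one_cons (by omega : a - 1 < b - 1)]
    simp only [List.foldl_cons, List.flatMap_cons]
    have h0 : (a == (0:Int)) = false := by simp; omega
    have h1 : (a == (1:Int)) = false := by simp; omega
    simp only [h0, h1, Bool.false_eq_true, if_false]
    rw [ih (a+1) b (by omega) (by omega)]
    have : a - 1 + 1 = a + 1 - 1 := by ring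
    rw [this]
    simp [String.append_assoc]

-- ===== VERDICT =====
theorem create_column_names_spec : Claim_equal_create_column_names := by
  intro n _
  show create_column_names n = create_column_names_alt n
  unfold create_column_names create_column_names_alt
  rcases (by omega : n ≤ 0 ∨ n = 1 ∨ 2 ≤ n) with h | h | h
  · rw [PySem.List.pyRange_one_eq_nil h, PySem.List.pyRange_one_eq_nil (by omega : n - 1 ≤ 1)]
    have : max n 0 = 0 := by omega
    rw [this]
    simp [PySem.List.slice_to]
  · subst h
    rw [PySem.List.pyRange_one_cons (by omega : (0:Int) < 1),
        PySem.List.pyRange_one_eq_nil (by omega : (1:Int) ≤ 0 + 1),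
        PySem.List.pyRange_one_eq_nil (by omega : (1:Int) - 1 ≤ 1)]
    have : max (1:Int) 0 = 1 := by omega
    rw [this]
    simp [PySem.List.slice_to]
  · rw [PySem.List.pyRange_one_cons (by omega : (0:Int) < n)]
    rw [show (0:Int)+1 = 1 by ring]
    rw [PySem.List.pyRange_one_cons (by omega : (1:Int) < n)]
    rw [show (1:Int)+1 = 2 by ring]
    simp only [List.foldl_cons]
    rw [pv_tail (n-2).toNat 2 n rfl (by omega)]
    have hm : max n 0 = n := by omega
    rw [hm, PySem.List.slice_to _ (by omega : (0:Int) ≤ n)]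
    have ht : (["ideal_curve", "ideal_curve_shifted"] : List String).take n.toNat
        = ["ideal_curve", "ideal_curve_shifted"] := by
      apply List.take_of_length_le; simp; omega
    rw [ht]
    rw [show (2:Int) - 1 = 1 by ring]
    simp [List.flatMap_map]
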